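-- pv_equiv track=rewrite | github.com/julienyinsper/EP2-CERTO | funcoes.py | calcula_pontos_quadra
-- ===== SOURCE A (Python) =====
-- def calcula_pontos_quadra(dados):
--     soma = 0
--     for dado in dados:
--         soma += dado
--
--     contagens = {}
--     for dado in dados:
--         if dado in contagens:
--             contagens[dado] += 1
--         else:
--             contagens[dado] = 1
--
--     for quantidade in contagens.values():
--         if quantidade >= 4:
--             return soma
--
--     return 0
-- ===== SOURCE B (Python) =====
-- def calcula_pontos_quadra(dados):
--     soma = sum(dados)
--     ordenados = sorted(dados)
--     for i in range(len(ordenados) - 3):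
--         if ordenados[i] == ordenados[i + 3]:
--             return soma
--     return 0
-- ===== Notes on version B (the rewrite author's own statement) =====
-- stated objective: alternative
-- what changed: Replaces the frequency dictionary with sorting: after sorted(dados), some value occurs >= 4 times iff some element equals the element three positions later, detected by one index scan over the sorted list.
import Mathlib
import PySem

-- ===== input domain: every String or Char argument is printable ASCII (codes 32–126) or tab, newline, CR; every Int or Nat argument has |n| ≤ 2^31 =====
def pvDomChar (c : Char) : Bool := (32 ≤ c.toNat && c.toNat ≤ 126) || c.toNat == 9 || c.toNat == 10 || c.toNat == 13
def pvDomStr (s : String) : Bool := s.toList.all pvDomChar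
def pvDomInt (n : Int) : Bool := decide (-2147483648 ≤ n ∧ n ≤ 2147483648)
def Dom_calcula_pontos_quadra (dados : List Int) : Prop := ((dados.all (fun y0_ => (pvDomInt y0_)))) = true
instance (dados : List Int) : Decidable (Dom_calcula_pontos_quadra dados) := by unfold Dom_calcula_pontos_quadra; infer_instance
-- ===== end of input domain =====

-- B replaces A's frequency dictionary by sorting: a value occurs ≥ 4 times iff, after
-- sorting, some element equals the element three positions later (objective: alternative).

-- ===== PORT A =====
-- 'for quantidade in contagens.values(): if quantidade >= 4: return soma / return 0'
def aValuesLoop (soma : Int) : List Int → Int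
  | [] => 0
  | q :: qs => if 4 ≤ q then soma else aValuesLoop soma qs

def calcula_pontos_quadra (dados : List Int) : Int :=
  let soma := dados.foldl (fun s d => s + d) 0
  let contagens := dados.foldl
    (fun c d => if c.contains d then c.modify d 0 (· + 1) else c.insert d 1)
    (PySem.Dict.empty : PySem.Dict Int Int)
  aValuesLoop soma contagens.values

-- ===== PORT B =====
-- 'for i in range(len(ordenados) - 3): if ordenados[i] == ordenados[i+3]: return soma / return 0'
-- every i drawn from the range is in bounds, so the pyGetD default 0 is never used
def bIdxLoop (ordenados : List Int) (soma : Int) : List Int → Int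
  | [] => 0
  | i :: rest =>
    if PySem.List.pyGetD ordenados i 0 = PySem.List.pyGetD ordenados (i + 3) 0 then soma
    else bIdxLoop ordenados soma rest

def calcula_pontos_quadra_alt (dados : List Int) : Int :=
  let soma := dados.sum
  let ordenados := PySem.List.sorted dados id
  bIdxLoop ordenados soma (PySem.List.pyRange 0 ((ordenados.length : Int) - 3) 1)

-- ===== PRECONDITION & SPEC =====
def Spec_calcula_pontos_quadra (dados : List Int) (out : Int) : Prop := out = calcula_pontos_quadra_alt dados
instance (dados : List Int) (out : Int) : Decidable (Spec_calcula_pontos_quadra dados out) := by unfold Spec_calcula_pontos_quadra; infer_instance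

-- ===== CLAIM (what is proved, stated in full; the proofs are below) =====
def Claim_equal_calcula_pontos_quadra : Prop := ∀ (dados : List Int), Dom_calcula_pontos_quadra dados → Spec_calcula_pontos_quadra dados (calcula_pontos_quadra dados)

-- ===== LEMMAS AND PROOFS =====

theorem modify_eq_insert_of_not_contains (d : PySem.Dict Int Int) (k : Int)
    (h : d.contains k = false) : d.modify k 0 (· + 1) = d.insert k 1 := by
  have hg : d.getD k 0 = 0 := by
    simp [PySem.Dict.getD, (PySem.Dict.get?_eq_none_iff_contains d k).2 h]
  simp [PySem.Dict.modify, hg]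

theorem counter_fold_eq (dados : List Int) :
    dados.foldl
      (fun c d => if c.contains d then c.modify d 0 (· + 1) else c.insert d 1)
      (PySem.Dict.empty : PySem.Dict Int Int) = PySem.Dict.counter dados := by
  rw [PySem.Dict.counter_eq_foldl]
  congr 1
  funext c d
  by_cases h : c.contains d
  · simp [h]
  · simp [eq_false_of_ne_true h, modify_eq_insert_of_not_contains c d (eq_false_of_ne_true h)]

theorem aValuesLoop_eq (soma : Int) (qs : List Int) :
    aValuesLoop soma qs = if ∃ q ∈ qs, (4 : Int) ≤ q then soma else 0 := by
  induction qs with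
  | nil => simp [aValuesLoop]
  | cons q qs ih =>
    simp only [aValuesLoop, ih]
    by_cases h : (4 : Int) ≤ q
    · simp [h]
    · simp [h]

theorem bIdxLoop_eq (ord : List Int) (soma : Int) (idxs : List Int) :
    bIdxLoop ord soma idxs =
      if ∃ i ∈ idxs, PySem.List.pyGetD ord i 0 = PySem.List.pyGetD ord (i + 3) 0
      then soma else 0 := by
  induction idxs with
  | nil => simp [bIdxLoop]
  | cons i rest ih =>
    simp only [bIdxLoop, ih]
    by_cases h : PySem.List.pyGetD ord i 0 = PySem.List.pyGetD ord (i + 3) 0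
    · simp [h]
    · simp [h]

theorem take_eq_replicate_of_sorted (x : Int) :
    ∀ (t : List Int), t.Pairwise (· ≤ ·) → (∀ y ∈ t, x ≤ y) →
      ∀ n, n ≤ t.count x → t.take n = List.replicate n x := by
  intro t
  induction t with
  | nil => intro _ _ n hn; simp at hn; subst hn; simp
  | cons a t ih =>
    intro hp hlb n hn
    match n with
    | 0 => simp
    | Nat.succ m =>
      have hx : x ∈ a :: t := List.count_pos_iff.1 (by omega)
      have hax : a = x := by
        rcases List.mem_cons.1 hx with h | hxt
        · omega
        · have h1 : a ≤ x := (List.pairwise_cons.1 hp).1 x hxt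
          have h2 : x ≤ a := hlb a (by simp)
          omega
      subst hax
      have hcnt : m ≤ t.count a := by
        have : (a :: t).count a = t.count a + 1 := List.count_cons_self
        omega
      have := ih (List.pairwise_cons.1 hp).2 (fun y hy => hlb y (by simp [hy])) m hcnt
      simp [List.take_succ_cons, this, List.replicate_succ]

theorem run_of_count (l : List Int) (hs : l.Pairwise (· ≤ ·)) :
    ∀ x ∈ l, 4 ≤ l.count x →
      ∃ j : Nat, ∃ h : j + 3 < l.length, l[j] = l[j + 3] := by
  induction l with
  | nil => simp
  | cons a t ih =>
    intro x hx hc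
    by_cases hax : a = x
    · subst hax
      have hlb : ∀ y ∈ a :: t, a ≤ y := by
        intro y hy
        rcases List.mem_cons.1 hy with h | h
        · omega
        · exact (List.pairwise_cons.1 hs).1 y h
      have htake := take_eq_replicate_of_sorted a (a :: t) hs hlb 4 hc
      have hlen : 4 ≤ (a :: t).length := le_trans hc (List.count_le_length)
      have htt : t.take 3 = List.replicate 3 a := by
        rw [show (4 : Nat) = 3 + 1 from rfl, List.take_succ_cons] at htake
        simpa [List.replicate_succ] using htake
      refine ⟨0, by simpa using hlen, ?_⟩
      have h2 : t[2]'(by simp at hlen; omega) = (t.take 3)[2]'(by simp [htt]) := by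
        simp [List.getElem_take]
      simp only [List.getElem_cons_zero, show (0+3 : Nat) = 2 + 1 from rfl,
        List.getElem_cons_succ]
      rw [h2]
      simp [htt]
    · have hxt : x ∈ t := by
        rcases List.mem_cons.1 hx with h | h
        · exact absurd h.symm hax
        · exact h
      have hct : 4 ≤ t.count x := by
        have : (a :: t).count x = t.count x := by simp [List.count_cons]; exact hax
        omega
      obtain ⟨j, hj, he⟩ := ih (List.pairwise_cons.1 hs).2 x hxt hct
      exact ⟨j + 1, by simpa using Nat.succ_lt_succ hj, by simpa using he⟩

theorem count_of_run (l : List Int) (hs : l.Pairwise (· ≤ ·))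
    (j : Nat) (h : j + 3 < l.length) (he : l[j] = l[j + 3]) :
    ∃ x ∈ l, 4 ≤ l.count x := by
  have hget : ∀ i k (hi : i < l.length) (hk : k < l.length), i < k → l[i] ≤ l[k] :=
    fun i k hi hk hik => (List.pairwise_iff_getElem.1 hs) i k hi hk hik
  have hall : ∀ k, (hk : k ≤ 3) → l[j + k]'(by omega) = l[j]'(by omega) := by
    intro k hk
    rcases Nat.eq_zero_or_pos k with h0 | h0
    · subst h0; rfl
    · apply le_antisymm
      · rcases Nat.lt_or_ge k 3 with h3 | h3
        · calc l[j + k]'(by omega) ≤ l[j + 3] := hget _ _ (by omega) (by omega) (by omega)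
            _ = l[j] := he.symm
        · have : k = 3 := by omega
          subst this; exact le_of_eq he.symm
      · exact hget _ _ (by omega) (by omega) (by omega)
  have hm : (l.drop j).take 4 = List.replicate 4 (l[j]'(by omega)) := by
    apply List.ext_getElem
    · simp; omega
    · intro k hk1 hk2
      have hk4 : k < 4 := by simpa using hk2
      rw [List.getElem_take, List.getElem_drop, List.getElem_replicate]
      exact hall k (by omega)
  have hsub : List.Sublist ((l.drop j).take 4) l :=
    (List.take_sublist 4 (l.drop j)).trans (List.drop_sublist j l)
  have hcnt : 4 ≤ l.count (l[j]'(by omega)) := by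
    have h1 : ((l.drop j).take 4).count (l[j]'(by omega)) = 4 := by
      rw [hm]; simp
    have := hsub.count_le (l[j]'(by omega))
    omega
  exact ⟨l[j]'(by omega), List.getElem_mem _, hcnt⟩

theorem run_iff (l : List Int) (hs : l.Pairwise (· ≤ ·)) :
    (∃ x ∈ l, 4 ≤ l.count x) ↔ (∃ j : Nat, ∃ h : j + 3 < l.length, l[j] = l[j + 3]) := by
  constructor
  · rintro ⟨x, hx, hc⟩; exact run_of_count l hs x hx hc
  · rintro ⟨j, h, he⟩; exact count_of_run l hs j h he

theorem calcula_pontos_quadra_eq_alt (dados : List Int) :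
    calcula_pontos_quadra dados = calcula_pontos_quadra_alt dados := by
  unfold calcula_pontos_quadra calcula_pontos_quadra_alt
  rw [counter_fold_eq, aValuesLoop_eq, bIdxLoop_eq]
  have hsum : dados.foldl (fun s d => s + d) 0 = dados.sum := by
    rw [List.sum_eq_foldl]
  rw [hsum]
  set ord := PySem.List.sorted dados id with hord
  have hperm : ord.Perm dados := PySem.List.sorted_perm dados id false
  have hs : ord.Pairwise (· ≤ ·) := PySem.List.sorted_pairwise dados id
  have hcondA : (∃ q ∈ (PySem.Dict.counter dados).values, (4 : Int) ≤ q)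
      ↔ ∃ x ∈ dados, 4 ≤ dados.count x := by
    have hv : (PySem.Dict.counter dados).values
        = (PySem.Set.ofList dados).map (fun k => (dados.count k : Int)) := by
      show ((PySem.Dict.counter dados).items).map (·.2) = _
      rw [PySem.Dict.items_counter, List.map_map]
      rfl
    rw [hv]
    constructor
    · rintro ⟨q, hq, h4⟩
      obtain ⟨k, hk, rfl⟩ := List.mem_map.1 hq
      exact ⟨k, (PySem.Set.mem_ofList dados k).1 hk, by exact_mod_cast h4⟩
    · rintro ⟨x, hx, h4⟩
      exact ⟨(dados.count x : Int), List.mem_map.2 ⟨x, (PySem.Set.mem_ofList dados x).2 hx, rfl⟩,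
        by exact_mod_cast h4⟩
  have hcondB : (∃ i ∈ PySem.List.pyRange 0 ((ord.length : Int) - 3) 1,
        PySem.List.pyGetD ord i 0 = PySem.List.pyGetD ord (i + 3) 0)
      ↔ ∃ j : Nat, ∃ h : j + 3 < ord.length, ord[j] = ord[j + 3] := by
    constructor
    · rintro ⟨i, hi, he⟩
      obtain ⟨h0, hlt⟩ := PySem.List.mem_pyRange_one.1 hi
      refine ⟨i.toNat, by omega, ?_⟩
      rw [PySem.List.pyGetD_eq_getElem ord 0 h0 (by omega),
          PySem.List.pyGetD_eq_getElem ord 0 (by omega) (by omega)] at he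
      have : (i + 3).toNat = i.toNat + 3 := by omega
      simp only [this] at he
      exact he
    · rintro ⟨j, hj, he⟩
      refine ⟨(j : Int), PySem.List.mem_pyRange_one.2 ⟨by omega, by omega⟩, ?_⟩
      rw [PySem.List.pyGetD_eq_getElem ord 0 (by omega) (by omega),
          PySem.List.pyGetD_eq_getElem ord 0 (by omega) (by omega)]
      have h1 : ((j : Int)).toNat = j := by omega
      have h2 : ((j : Int) + 3).toNat = j + 3 := by omega
      simp only [h1, h2]
      exact he
  have hcnt : ∀ x, ord.count x = dados.count x := fun x => hperm.count_eq x
  have hmem : ∀ x, x ∈ ord ↔ x ∈ dados := fun x => hperm.mem_iff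
  have : (∃ q ∈ (PySem.Dict.counter dados).values, (4 : Int) ≤ q)
      ↔ (∃ i ∈ PySem.List.pyRange 0 ((ord.length : Int) - 3) 1,
        PySem.List.pyGetD ord i 0 = PySem.List.pyGetD ord (i + 3) 0) := by
    rw [hcondA, hcondB, ← run_iff ord hs]
    constructor
    · rintro ⟨x, hx, h4⟩; exact ⟨x, (hmem x).2 hx, by rw [hcnt x]; exact h4⟩
    · rintro ⟨x, hx, h4⟩; exact ⟨x, (hmem x).1 hx, by rw [← hcnt x]; exact h4⟩
  rw [if_congr this rfl rfl]

-- ===== VERDICT (by name: the statement is the Claim_ definition above) =====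
theorem calcula_pontos_quadra_spec : Claim_equal_calcula_pontos_quadra := by
  intro dados _
  unfold Spec_calcula_pontos_quadra
  exact calcula_pontos_quadra_eq_alt dados
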